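-- pv_equiv track=rewrite | github.com/jasondavies/rectangle-free | count4.py | rectfree_3xn_k
-- ===== SOURCE A (Python) =====
-- def falling(n: int, m: int) -> int:
--     p = 1
--     for i in range(m):
--         p *= n - i
--     return p
--
-- def poly_mul(a: list[int], b: list[int]) -> list[int]:
--     out = [0] * (len(a) + len(b) - 1)
--     for i, ai in enumerate(a):
--         for j, bj in enumerate(b):
--             out[i + j] += ai * bj
--     return out
--
-- def poly_pow(p: list[int], k: int) -> list[int]:
--     out = [1]
--     base = p[:]
--     e = k
--     while e:
--         if e & 1:
--             out = poly_mul(out, base)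
--         e >>= 1
--         if e:
--             base = poly_mul(base, base)
--     return out
--
-- def rectfree_3xn_k(n: int, k: int) -> int:
--     if n < 0 or k < 0:
--         return 0
--     km1 = k - 1
--     g = [1, 1 + 3 * km1, 3 * (km1**2), km1**3]
--     s = poly_pow(g, k)
--     free_columns = k * (k - 1) * (k - 2)
--     total = 0
--     for m in range(min(len(s) - 1, n) + 1):
--         total += s[m] * falling(n, m) * (free_columns ** (n - m))
--     return total
-- ===== SOURCE B (Python) =====
-- def rectfree_3xn_k(n: int, k: int) -> int:
--     if n < 0 or k < 0:
--         return 0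
--     c = k - 1
--     g = [1, 1 + 3 * c, 3 * c * c, c * c * c]
--     # linear-pass exponentiation: multiply by the fixed cubic g exactly k times,
--     # each multiplication a single comprehension pass (4-term convolution window)
--     s = [1]
--     for _ in range(k):
--         s = [sum(g[j] * s[i - j] for j in range(4) if 0 <= i - j < len(s))
--              for i in range(len(s) + 3)]
--     fc = k * (k - 1) * (k - 2)
--     total = 0
--     fall = 1  # falling factorial n*(n-1)*...*(n-m+1), maintained incrementally
--     for m in range(min(len(s) - 1, n) + 1):
--         total += s[m] * fall * fc ** (n - m)
--         fall *= n - m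
--     return total
-- ===== Notes on version B (the rewrite author's own statement) =====
-- stated objective: alternative
-- what changed: Binary (square-and-multiply) polynomial exponentiation with a generic nested-loop poly_mul is replaced by k linear passes of a fixed 4-term convolution window (comprehension) against the cubic g, and the final sum maintains the falling factorial incrementally instead of calling falling() each iteration.
import Mathlib
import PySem

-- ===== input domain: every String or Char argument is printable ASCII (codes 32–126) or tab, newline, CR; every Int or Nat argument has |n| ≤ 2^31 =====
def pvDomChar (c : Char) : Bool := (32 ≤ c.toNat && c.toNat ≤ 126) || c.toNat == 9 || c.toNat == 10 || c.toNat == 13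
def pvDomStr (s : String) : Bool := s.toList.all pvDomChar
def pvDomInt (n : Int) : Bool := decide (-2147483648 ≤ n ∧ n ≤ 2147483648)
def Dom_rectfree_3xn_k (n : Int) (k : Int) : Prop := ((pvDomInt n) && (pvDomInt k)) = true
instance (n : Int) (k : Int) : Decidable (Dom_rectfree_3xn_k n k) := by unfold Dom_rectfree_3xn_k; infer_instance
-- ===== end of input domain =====

-- B replaces binary polynomial exponentiation by k single-pass 4-term convolutions and
-- maintains the falling factorial incrementally; same values, a different algorithm.

-- ===== PORT A =====
def fallingA (n : Int) (m : Int) : Int :=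
  (PySem.List.pyRange 0 m 1).foldl (fun p i => p * (n - i)) 1

-- out[i+j] += ai*bj : indices are always in range here, so pySetD/pyGetD are exact
def polyMulA (a b : List Int) : List Int :=
  (PySem.List.enumerate a 0).foldl (fun out p =>
    (PySem.List.enumerate b 0).foldl (fun out q =>
      PySem.List.pySetD out (p.1 + q.1) (PySem.List.pyGetD out (p.1 + q.1) 0 + p.2 * q.2)) out)
    (List.replicate (a.length + b.length - 1) 0)

-- the 'while e:' loop of poly_pow; e is a Nat because poly_pow is only called with k ≥ 0
def polyPowGo (base out : List Int) (e : Nat) : List Int :=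
  if h : e = 0 then out
  else
    let out' := if e % 2 = 1 then polyMulA out base else out
    let e' := e / 2
    let base' := if e' ≠ 0 then polyMulA base base else base
    polyPowGo base' out' e'
termination_by e
decreasing_by omega

def polyPowA (p : List Int) (k : Int) : List Int := polyPowGo p [1] k.toNat

def rectfree_3xn_k (n : Int) (k : Int) : Int :=
  if n < 0 ∨ k < 0 then 0
  else
    let km1 := k - 1
    let g : List Int := [1, 1 + 3 * km1, 3 * km1 ^ 2, km1 ^ 3]
    let s := polyPowA g k
    let fc := k * (k - 1) * (k - 2)
    -- inside the loop m ≤ n, so the exponent n - m is ≥ 0 and toNat is exact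
    (PySem.List.pyRange 0 (min ((s.length : Int) - 1) n + 1) 1).foldl
      (fun total m => total + PySem.List.pyGetD s m 0 * fallingA n m * fc ^ (n - m).toNat) 0

-- ===== PORT B =====
-- one comprehension pass: multiply s by the fixed cubic g (4-term window)
def stepB (g s : List Int) : List Int :=
  (PySem.List.pyRange 0 ((s.length : Int) + 3) 1).map (fun i =>
    (((PySem.List.pyRange 0 4 1).filter
        (fun j => decide (0 ≤ i - j) && decide (i - j < (s.length : Int)))).map
      (fun j => PySem.List.pyGetD g j 0 * PySem.List.pyGetD s (i - j) 0)).sum)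

def rectfree_3xn_k_alt (n : Int) (k : Int) : Int :=
  if n < 0 ∨ k < 0 then 0
  else
    let c := k - 1
    let g : List Int := [1, 1 + 3 * c, 3 * c * c, c * c * c]
    -- 'for _ in range(k)': k ≥ 0 here, so List.range k.toNat is exact
    let s := (List.range k.toNat).foldl (fun s _ => stepB g s) [1]
    let fc := k * (k - 1) * (k - 2)
    ((PySem.List.pyRange 0 (min ((s.length : Int) - 1) n + 1) 1).foldl
      (fun (tf : Int × Int) m =>
        (tf.1 + PySem.List.pyGetD s m 0 * tf.2 * fc ^ (n - m).toNat, tf.2 * (n - m)))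
      ((0 : Int), (1 : Int))).1

-- ===== PRECONDITION & SPEC =====
def Spec_rectfree_3xn_k (n : Int) (k : Int) (out : Int) : Prop := out = rectfree_3xn_k_alt n k
instance (n : Int) (k : Int) (out : Int) : Decidable (Spec_rectfree_3xn_k n k out) := by unfold Spec_rectfree_3xn_k; infer_instance

-- ===== CLAIM (what is proved, stated in full; the proofs are below) =====
def Claim_equal_rectfree_3xn_k : Prop := ∀ (n : Int) (k : Int), Dom_rectfree_3xn_k n k → Spec_rectfree_3xn_k n k (rectfree_3xn_k n k)

-- ===== LEMMAS AND PROOFS =====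

-- coefficient-list → polynomial abstraction
noncomputable def pvToPoly : List Int → Polynomial Int
  | [] => 0
  | x :: l => Polynomial.C x + Polynomial.X * pvToPoly l

theorem pvToPoly_coeff (l : List Int) (i : Nat) : (pvToPoly l).coeff i = l.getD i 0 := by
  induction l generalizing i with
  | nil => simp [pvToPoly]
  | cons x l ih =>
    cases i with
    | zero => simp [pvToPoly]
    | succ i =>
      rw [pvToPoly, Polynomial.coeff_add, Polynomial.coeff_X_mul, Polynomial.coeff_C]
      simp [ih]

theorem pvToPoly_replicate (L : Nat) : pvToPoly (List.replicate L 0) = 0 := by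
  induction L with
  | zero => simp [pvToPoly]
  | succ L ih => simp [List.replicate, pvToPoly, ih]

theorem pvEq_of_toPoly (l1 l2 : List Int) (hl : l1.length = l2.length)
    (hp : pvToPoly l1 = pvToPoly l2) : l1 = l2 := by
  apply List.ext_getElem hl
  intro i h1 h2
  have := congrArg (fun p => Polynomial.coeff p i) hp
  simpa [pvToPoly_coeff, List.getD_eq_getElem?_getD, List.getElem?_eq_getElem, h1, h2] using this

theorem pvToPoly_addAt (out : List Int) (t v : Int) (h0 : 0 ≤ t) (hl : t.toNat < out.length) :
    pvToPoly (PySem.List.pySetD out t (PySem.List.pyGetD out t 0 + v))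
      = pvToPoly out + Polynomial.C v * Polynomial.X ^ t.toNat := by
  have ht : t = ((t.toNat : Nat) : Int) := by omega
  rw [ht, PySem.List.pySetD_natCast, PySem.List.pyGetD_natCast]
  apply Polynomial.ext
  intro i
  simp only [Polynomial.coeff_add, Polynomial.coeff_C_mul, Polynomial.coeff_X_pow,
    pvToPoly_coeff, List.getD_eq_getElem?_getD, List.getElem?_set, Int.toNat_natCast]
  by_cases h : t.toNat = i
  · subst h
    simp [hl]
  · have h' : ¬(i = t.toNat) := fun hh => h hh.symm
    simp [h, h']

theorem pvInner_spec (ai i : Int) (hi : 0 ≤ i) : ∀ (b : List Int) (j0 : Int) (out : List Int),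
    0 ≤ j0 → (i + j0).toNat + b.length ≤ out.length →
    (((PySem.List.enumerate b j0).foldl (fun o q =>
        PySem.List.pySetD o (i + q.1) (PySem.List.pyGetD o (i + q.1) 0 + ai * q.2)) out).length
      = out.length) ∧
    pvToPoly ((PySem.List.enumerate b j0).foldl (fun o q =>
        PySem.List.pySetD o (i + q.1) (PySem.List.pyGetD o (i + q.1) 0 + ai * q.2)) out)
      = pvToPoly out + Polynomial.C ai * Polynomial.X ^ (i + j0).toNat * pvToPoly b := by
  intro b
  induction b with
  | nil => intro j0 out _ _; simp [PySem.List.enumerate_nil, pvToPoly]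
  | cons x b ih =>
    intro j0 out hj0 hle
    rw [PySem.List.enumerate_cons]
    simp only [List.foldl_cons, List.length_cons] at *
    have htl : (i + j0).toNat < out.length := by omega
    have hlen1 : (PySem.List.pySetD out (i + j0)
        (PySem.List.pyGetD out (i + j0) 0 + ai * x)).length = out.length := by
      simp [PySem.List.length_pySetD]
    have hstep := pvToPoly_addAt out (i + j0) (ai * x) (by omega) htl
    obtain ⟨ihl, ihp⟩ := ih (j0 + 1) _ (by omega) (by omega : (i + (j0 + 1)).toNat + b.length ≤
      (PySem.List.pySetD out (i + j0) (PySem.List.pyGetD out (i + j0) 0 + ai * x)).length)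
    refine ⟨by rw [ihl, hlen1], ?_⟩
    rw [ihp, hstep]
    have he : (i + (j0 + 1)).toNat = (i + j0).toNat + 1 := by omega
    rw [he, pvToPoly, map_mul, pow_succ]
    ring

theorem pvOuter_spec (b : List Int) : ∀ (a : List Int) (i0 : Int) (out : List Int),
    0 ≤ i0 → i0.toNat + a.length + b.length ≤ out.length + 1 →
    (((PySem.List.enumerate a i0).foldl (fun out p =>
        (PySem.List.enumerate b 0).foldl (fun out q =>
          PySem.List.pySetD out (p.1 + q.1)
            (PySem.List.pyGetD out (p.1 + q.1) 0 + p.2 * q.2)) out) out).length = out.length) ∧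
    pvToPoly ((PySem.List.enumerate a i0).foldl (fun out p =>
        (PySem.List.enumerate b 0).foldl (fun out q =>
          PySem.List.pySetD out (p.1 + q.1)
            (PySem.List.pyGetD out (p.1 + q.1) 0 + p.2 * q.2)) out) out)
      = pvToPoly out + Polynomial.X ^ i0.toNat * pvToPoly a * pvToPoly b := by
  intro a
  induction a with
  | nil => intro i0 out _ _; simp [PySem.List.enumerate_nil, pvToPoly]
  | cons x a ih =>
    intro i0 out hi0 hle
    rw [PySem.List.enumerate_cons]
    simp only [List.foldl_cons, List.length_cons] at *
    obtain ⟨hl1, hp1⟩ := pvInner_spec x i0 hi0 b 0 out (by omega) (by omega)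
    obtain ⟨ihl, ihp⟩ := ih (i0 + 1)
      ((PySem.List.enumerate b 0).foldl (fun o q =>
        PySem.List.pySetD o (i0 + q.1) (PySem.List.pyGetD o (i0 + q.1) 0 + x * q.2)) out)
      (by omega) (by rw [hl1]; omega)
    refine ⟨by rw [ihl, hl1], ?_⟩
    rw [ihp, hp1]
    have he : (i0 + 1).toNat = i0.toNat + 1 := by omega
    rw [he, pvToPoly, pow_succ, add_zero]
    ring

theorem pvLen_polyMulA (a b : List Int) (ha : a ≠ []) (hb : b ≠ []) :
    (polyMulA a b).length = a.length + b.length - 1 := by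
  have h1 : 1 ≤ a.length := List.length_pos_iff.mpr ha
  have h2 : 1 ≤ b.length := List.length_pos_iff.mpr hb
  obtain ⟨hl, _⟩ := pvOuter_spec b a 0 (List.replicate (a.length + b.length - 1) 0)
    le_rfl (by simp; omega)
  unfold polyMulA
  rw [hl]; simp

theorem pvToPoly_polyMulA (a b : List Int) (ha : a ≠ []) (hb : b ≠ []) :
    pvToPoly (polyMulA a b) = pvToPoly a * pvToPoly b := by
  have h1 : 1 ≤ a.length := List.length_pos_iff.mpr ha
  have h2 : 1 ≤ b.length := List.length_pos_iff.mpr hb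
  obtain ⟨_, hp⟩ := pvOuter_spec b a 0 (List.replicate (a.length + b.length - 1) 0)
    le_rfl (by simp; omega)
  unfold polyMulA
  rw [hp, pvToPoly_replicate]
  simp

theorem pvMulA_ne_nil (a b : List Int) (ha : a ≠ []) (hb : b ≠ []) : polyMulA a b ≠ [] := by
  have h1 : 1 ≤ a.length := List.length_pos_iff.mpr ha
  have h2 : 1 ≤ b.length := List.length_pos_iff.mpr hb
  have := pvLen_polyMulA a b ha hb
  intro h
  rw [h] at this
  simp at this
  omega

theorem pvPolyPowGo_spec (e : Nat) : ∀ (base out : List Int), base ≠ [] → out ≠ [] →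
    pvToPoly (polyPowGo base out e) = pvToPoly out * pvToPoly base ^ e ∧
    (polyPowGo base out e).length = out.length + (base.length - 1) * e := by
  induction e using Nat.strong_induction_on with
  | _ e ih =>
    intro base out hb ho
    have hbl : 1 ≤ base.length := List.length_pos_iff.mpr hb
    have hol : 1 ≤ out.length := List.length_pos_iff.mpr ho
    rw [polyPowGo]
    by_cases h0 : e = 0
    · subst h0; simp
    · rw [dif_neg h0]
      by_cases hq : e / 2 = 0
      · have he1 : e = 1 := by omega
        subst he1
        simp only [Nat.reduceMod, Nat.reduceDiv]
        norm_num
        rw [polyPowGo]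
        rw [dif_pos rfl]
        refine ⟨?_, ?_⟩
        · rw [pvToPoly_polyMulA out base ho hb]
        · rw [pvLen_polyMulA out base ho hb]; omega
      · simp only [ne_eq, hq, not_false_eq_true, if_true]
        have hb' : polyMulA base base ≠ [] := pvMulA_ne_nil base base hb hb
        have hlb' : (polyMulA base base).length = base.length + base.length - 1 :=
          pvLen_polyMulA base base hb hb
        obtain ⟨m, hmm⟩ : ∃ m, base.length = m + 1 := ⟨base.length - 1, by omega⟩
        by_cases hm : e % 2 = 1
        · rw [if_pos hm]
          have ho' : polyMulA out base ≠ [] := pvMulA_ne_nil out base ho hb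
          obtain ⟨hp, hl⟩ := ih (e / 2) (by omega) (polyMulA base base) (polyMulA out base) hb' ho'
          generalize hge : e / 2 = q at hp hl
          have he : e = 2 * q + 1 := by omega
          constructor
          · rw [hp, pvToPoly_polyMulA out base ho hb, pvToPoly_polyMulA base base hb hb, he,
              pow_add, pow_mul, pow_one, ← sq]
            ring
          · rw [hl, pvLen_polyMulA out base ho hb, hlb', hmm, he]
            have h1 : m + 1 + (m + 1) - 1 - 1 = 2 * m := by omega
            have h2 : out.length + (m + 1) - 1 = out.length + m := by omega
            have h3 : m + 1 - 1 = m := by omega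
            rw [h1, h2, h3]
            ring
        · rw [if_neg hm]
          obtain ⟨hp, hl⟩ := ih (e / 2) (by omega) (polyMulA base base) out hb' ho
          generalize hge : e / 2 = q at hp hl
          have he : e = 2 * q := by omega
          constructor
          · rw [hp, pvToPoly_polyMulA base base hb hb, he, pow_mul, ← sq]
          · rw [hl, hlb', hmm, he]
            have h1 : m + 1 + (m + 1) - 1 - 1 = 2 * m := by omega
            have h3 : m + 1 - 1 = m := by omega
            rw [h1, h3]
            ring

theorem pvStepB_len (g s : List Int) : (stepB g s).length = s.length + 3 := by
  simp [stepB, PySem.List.length_pyRange_one]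
  omega

theorem pvSum_filter_range (n : Nat) (q : Nat → Bool) (h : Nat → Int) :
    (((List.range n).filter q).map h).sum = ∑ j ∈ Finset.range n, if q j then h j else 0 := by
  induction n with
  | zero => simp
  | succ n ih =>
    rw [List.range_succ, List.filter_append, List.map_append, List.sum_append,
      Finset.sum_range_succ, ih]
    by_cases hq : q n <;> simp [hq]

theorem pvTerm_eq (g s : List Int) (t j : Nat) :
    (if (decide (0 ≤ (t : Int) - (j : Int)) && decide ((t : Int) - (j : Int) < (s.length : Int)))
        = true
     then PySem.List.pyGetD g (j : Int) 0 * PySem.List.pyGetD s ((t : Int) - (j : Int)) 0 else 0)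
    = (if j ≤ t then g.getD j 0 * s.getD (t - j) 0 else 0) := by
  by_cases h1 : j ≤ t
  · rw [if_pos h1]
    by_cases h2 : t - j < s.length
    · have hc : (decide (0 ≤ (t : Int) - (j : Int))
          && decide ((t : Int) - (j : Int) < (s.length : Int))) = true := by
        simp; omega
      rw [if_pos hc]
      have hi : (t : Int) - (j : Int) = ((t - j : Nat) : Int) := by omega
      rw [hi, PySem.List.pyGetD_natCast, PySem.List.pyGetD_natCast]
    · have hc : ¬ ((decide (0 ≤ (t : Int) - (j : Int))
          && decide ((t : Int) - (j : Int) < (s.length : Int))) = true) := by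
        simp; omega
      rw [if_neg hc, List.getD_eq_default _ _ (by omega : s.length ≤ t - j), mul_zero]
  · have hc : ¬ ((decide (0 ≤ (t : Int) - (j : Int))
        && decide ((t : Int) - (j : Int) < (s.length : Int))) = true) := by
      simp
      intro h'
      omega
    rw [if_neg hc, if_neg h1]

theorem pvStepB_toPoly (g s : List Int) (hg : g.length = 4) :
    pvToPoly (stepB g s) = pvToPoly g * pvToPoly s := by
  apply Polynomial.ext
  intro t
  rw [pvToPoly_coeff, Polynomial.coeff_mul, Finset.Nat.sum_antidiagonal_eq_sum_range_succ_mk]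
  simp only [pvToPoly_coeff]
  by_cases ht : t < s.length + 3
  · rw [← PySem.List.pyGetD_natCast (stepB g s) t 0]
    unfold stepB
    rw [show ((s.length : Int) + 3) = ((s.length + 3 : Nat) : Int) by push_cast; ring]
    rw [PySem.List.pyGetD_map_pyRange _ (s.length + 3) t 0 ht]
    rw [PySem.List.pyRange_one 0 4]
    simp only [sub_zero, zero_add]
    rw [show Int.toNat 4 = 4 from rfl]
    rw [List.filter_map, List.map_map]
    rw [pvSum_filter_range]
    simp only [Function.comp_def]
    have key : (∑ j ∈ Finset.range (t + 1), g.getD j 0 * s.getD (t - j) 0)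
        = ∑ j ∈ Finset.range 4, (if j ≤ t then g.getD j 0 * s.getD (t - j) 0 else 0) := by
      have e1 : ∀ j ∈ Finset.range (t + 1), g.getD j 0 * s.getD (t - j) 0
          = (if j ≤ t ∧ j < 4 then g.getD j 0 * s.getD (t - j) 0 else 0) := by
        intro j hj
        rw [Finset.mem_range] at hj
        by_cases h4j : j < 4
        · rw [if_pos ⟨by omega, h4j⟩]
        · rw [List.getD_eq_default _ _ (by omega : g.length ≤ j), zero_mul, if_neg (by omega)]
      rw [Finset.sum_congr rfl e1]
      rw [Finset.sum_subset
        (by intro x hx; rw [Finset.mem_range] at *; omega :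
          Finset.range (t + 1) ⊆ Finset.range (t + 4))
        (fun j _ hj => by rw [Finset.mem_range] at hj; rw [if_neg (by omega)])]
      rw [← Finset.sum_subset
        (by intro x hx; rw [Finset.mem_range] at *; omega :
          Finset.range 4 ⊆ Finset.range (t + 4))
        (fun j _ hj => by rw [Finset.mem_range] at hj; rw [if_neg (by omega)])]
      exact Finset.sum_congr rfl (fun j hj => by
        rw [Finset.mem_range] at hj
        by_cases h1 : j ≤ t
        · rw [if_pos ⟨h1, hj⟩, if_pos h1]
        · rw [if_neg (by omega), if_neg h1])
    rw [key]
    exact Finset.sum_congr rfl (fun j _ => pvTerm_eq g s t j)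
  · rw [List.getD_eq_default _ _ (by rw [pvStepB_len]; omega)]
    symm
    apply Finset.sum_eq_zero
    intro j hj
    rw [Finset.mem_range] at hj
    by_cases h4j : j < 4
    · rw [List.getD_eq_default s _ (by omega : s.length ≤ t - j), mul_zero]
    · rw [List.getD_eq_default g _ (by omega : g.length ≤ j), zero_mul]

theorem pvFalling_succ (n lo : Int) (h : 0 ≤ lo) :
    fallingA n (lo + 1) = fallingA n lo * (n - lo) := by
  unfold fallingA
  rw [PySem.List.pyRange_one_succ_right h]
  simp

theorem pvLoop_eq (s : List Int) (n fc : Int) (hi : Int) : ∀ (lo t0 : Int), 0 ≤ lo →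
    ((PySem.List.pyRange lo hi 1).foldl
      (fun (tf : Int × Int) m =>
        (tf.1 + PySem.List.pyGetD s m 0 * tf.2 * fc ^ (n - m).toNat, tf.2 * (n - m)))
      (t0, fallingA n lo)).1
    = (PySem.List.pyRange lo hi 1).foldl
      (fun total m => total + PySem.List.pyGetD s m 0 * fallingA n m * fc ^ (n - m).toNat) t0 := by
  intro lo t0 hlo
  generalize hN : (hi - lo).toNat = N
  induction N generalizing lo t0 with
  | zero =>
    rw [PySem.List.pyRange_one_eq_nil (by omega)]
    simp
  | succ N ih =>
    rw [PySem.List.pyRange_one_cons (by omega)]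
    simp only [List.foldl_cons]
    rw [← pvFalling_succ n lo hlo]
    exact ih (lo + 1) _ (by omega) (by omega)

theorem pvIterB (g : List Int) (hg : g.length = 4) (j : Nat) :
    ((List.range j).foldl (fun s _ => stepB g s) [1]).length = 1 + 3 * j ∧
    pvToPoly ((List.range j).foldl (fun s _ => stepB g s) [1])
      = pvToPoly [1] * pvToPoly g ^ j := by
  induction j with
  | zero => simp
  | succ j ih =>
    rw [List.range_succ, List.foldl_append]
    simp only [List.foldl_cons, List.foldl_nil]
    obtain ⟨ihl, ihp⟩ := ih
    refine ⟨by rw [pvStepB_len, ihl]; ring, ?_⟩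
    rw [pvStepB_toPoly g _ hg, ihp, pow_succ]
    ring

theorem pvFalling_zero (n : Int) : fallingA n 0 = 1 := by
  unfold fallingA
  rw [PySem.List.pyRange_one_eq_nil le_rfl]
  rfl

theorem pvS_eq (k : Int) :
    polyPowA [1, 1 + 3 * (k - 1), 3 * (k - 1) ^ 2, (k - 1) ^ 3] k
      = (List.range k.toNat).foldl
          (fun s _ => stepB [1, 1 + 3 * (k - 1), 3 * (k - 1) * (k - 1),
            (k - 1) * (k - 1) * (k - 1)] s) [1] := by
  have hge : ([1, 1 + 3 * (k - 1), 3 * (k - 1) ^ 2, (k - 1) ^ 3] : List Int)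
      = [1, 1 + 3 * (k - 1), 3 * (k - 1) * (k - 1), (k - 1) * (k - 1) * (k - 1)] := by
    have h2 : (3 : Int) * (k - 1) ^ 2 = 3 * (k - 1) * (k - 1) := by ring
    have h3 : (k - 1) ^ 3 = (k - 1) * (k - 1) * (k - 1) := by ring
    rw [h2, h3]
  rw [hge]
  set g : List Int := [1, 1 + 3 * (k - 1), 3 * (k - 1) * (k - 1),
    (k - 1) * (k - 1) * (k - 1)] with hgdef
  have hg4 : g.length = 4 := rfl
  have hgne : g ≠ [] := by rw [hgdef]; simp
  obtain ⟨hAp, hAl⟩ := pvPolyPowGo_spec k.toNat g [1] hgne (by simp)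
  obtain ⟨hBl, hBp⟩ := pvIterB g hg4 k.toNat
  apply pvEq_of_toPoly
  · unfold polyPowA
    rw [hAl, hBl, hg4]
    simp
  · unfold polyPowA
    rw [hAp, hBp]

-- ===== VERDICT (by name: the statement is the Claim_ definition above) =====
theorem rectfree_3xn_k_spec : Claim_equal_rectfree_3xn_k := by
  intro n k _
  simp only [Spec_rectfree_3xn_k, rectfree_3xn_k, rectfree_3xn_k_alt]
  by_cases h : n < 0 ∨ k < 0
  · rw [if_pos h, if_pos h]
  · rw [if_neg h, if_neg h]
    rw [pvS_eq k]
    set s := (List.range k.toNat).foldl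
      (fun s _ => stepB [1, 1 + 3 * (k - 1), 3 * (k - 1) * (k - 1),
        (k - 1) * (k - 1) * (k - 1)] s) [1] with hsdef
    have h0 := pvLoop_eq s n (k * (k - 1) * (k - 2))
      (min ((s.length : Int) - 1) n + 1) 0 0 le_rfl
    rw [pvFalling_zero] at h0
    exact h0.symm
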